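-- pv_equiv track=rewrite | github.com/lmunoz-m/AdventOfCode2022 | 01/main.py | searchThreeMaxNumbers
-- ===== SOURCE A (Python) =====
-- def searchThreeMaxNumbers(sumTotal):
-- 	max1 = 0
-- 	max2 = 0
-- 	max3 = 0
-- 	for sum in sumTotal:
-- 		if sum > max1:
-- 			max3 = max2
-- 			max2 = max1
-- 			max1 = sum
-- 		elif sum > max2:
-- 			max3 = max2
-- 			max2 = sum
-- 		elif sum > max3:
-- 			max3 = sum
-- 	return max1, max2, max3, (max1 + max2 + max3)
-- ===== SOURCE B (Python) =====
-- def searchThreeMaxNumbers(sumTotal):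
-- 	vals = sorted(list(sumTotal) + [0, 0, 0], reverse=True)
-- 	a, b, c = vals[0], vals[1], vals[2]
-- 	return a, b, c, a + b + c
-- ===== Notes on version B (the rewrite author's own statement) =====
-- stated objective: simpler
-- what changed: Replaces the streaming three-way cascade of comparisons with sort-then-select: sort the values (padded with three zeros to reproduce the floor-at-0 initialization) in descending order and take the first three.
import Mathlib
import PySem

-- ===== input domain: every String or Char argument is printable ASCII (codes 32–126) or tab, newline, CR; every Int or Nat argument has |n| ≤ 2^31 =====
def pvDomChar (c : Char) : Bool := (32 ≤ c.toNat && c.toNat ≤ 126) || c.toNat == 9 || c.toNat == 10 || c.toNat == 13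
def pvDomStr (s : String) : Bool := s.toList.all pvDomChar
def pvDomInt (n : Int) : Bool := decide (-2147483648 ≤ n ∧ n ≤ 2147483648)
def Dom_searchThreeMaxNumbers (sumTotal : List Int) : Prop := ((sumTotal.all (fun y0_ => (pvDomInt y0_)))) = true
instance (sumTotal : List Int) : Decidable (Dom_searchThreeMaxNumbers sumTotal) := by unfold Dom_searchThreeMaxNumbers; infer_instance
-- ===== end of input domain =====

-- B replaces A's streaming three-way comparison cascade with sort-then-select
-- (descending sort of the values padded with three zeros, take the first three); objective: simpler.


-- ===== PORT A =====
-- one loop step of A's for-loop (the if/elif/elif cascade over (max1, max2, max3))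
def stepA : (Int × Int × Int) → Int → (Int × Int × Int)
  | (m1, m2, m3), s =>
    if s > m1 then (s, m1, m2)
    else if s > m2 then (m1, s, m2)
    else if s > m3 then (m1, m2, s)
    else (m1, m2, m3)

def searchThreeMaxNumbers (sumTotal : List Int) : Int × Int × Int × Int :=
  match sumTotal.foldl stepA (0, 0, 0) with
  | (m1, m2, m3) => (m1, m2, m3, m1 + m2 + m3)

-- ===== PORT B =====
def searchThreeMaxNumbers_alt (sumTotal : List Int) : Int × Int × Int × Int :=
  match PySem.List.sorted (sumTotal ++ [0, 0, 0]) (fun x => x) true with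
  | a :: b :: c :: _ => (a, b, c, a + b + c)
  | _ => (0, 0, 0, 0)   -- unreachable: the sorted list always has ≥ 3 elements

-- ===== PRECONDITION & SPEC =====
def Spec_searchThreeMaxNumbers (sumTotal : List Int) (out : Int × Int × Int × Int) : Prop := out = searchThreeMaxNumbers_alt sumTotal
instance (sumTotal : List Int) (out : Int × Int × Int × Int) : Decidable (Spec_searchThreeMaxNumbers sumTotal out) := by unfold Spec_searchThreeMaxNumbers; infer_instance

-- ===== CLAIM (what is proved, stated in full; the proofs are below) =====
def Claim_equal_searchThreeMaxNumbers : Prop := ∀ (sumTotal : List Int), Dom_searchThreeMaxNumbers sumTotal → Spec_searchThreeMaxNumbers sumTotal (searchThreeMaxNumbers sumTotal)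

-- ===== LEMMAS AND PROOFS =====

-- insertion into a descending list (proof-side tool relating B's sort to A's step)
def insD (x : Int) : List Int → List Int
  | [] => [x]
  | y :: ys => if x > y then x :: y :: ys else y :: insD x ys

lemma insD_perm (x : Int) (l : List Int) : (insD x l).Perm (x :: l) := by
  induction l with
  | nil => simp [insD]
  | cons y ys ih =>
    simp only [insD]
    split
    · exact List.Perm.refl _
    · exact (ih.cons y).trans (List.Perm.swap x y ys)

lemma mem_insD {z x : Int} {l : List Int} : z ∈ insD x l ↔ z = x ∨ z ∈ l := by
  have := (insD_perm x l).mem_iff (a := z)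
  simpa using this

lemma insD_pairwise {x : Int} {l : List Int}
    (h : l.Pairwise (fun a b => b ≤ a)) : (insD x l).Pairwise (fun a b => b ≤ a) := by
  induction l with
  | nil => simp [insD]
  | cons y ys ih =>
    rcases List.pairwise_cons.mp h with ⟨hy, hys⟩
    simp only [insD]
    split
    · rename_i hgt
      refine List.pairwise_cons.mpr ⟨?_, h⟩
      intro z hz
      rcases List.mem_cons.mp hz with hz1 | hz1
      · omega
      · have := hy z hz1; omega
    · rename_i hle
      refine List.pairwise_cons.mpr ⟨?_, ih hys⟩
      intro z hz
      rcases mem_insD.mp hz with hz1 | hz1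
      · omega
      · exact hy z hz1

-- B's descending sort of (l ++ [x] ++ pad) is x inserted into the sort of (l ++ pad)
lemma sorted_append_singleton (l : List Int) (x : Int) (pad : List Int) :
    PySem.List.sorted ((l ++ [x]) ++ pad) (fun y => y) true
      = insD x (PySem.List.sorted (l ++ pad) (fun y => y) true) := by
  have hperm : (PySem.List.sorted ((l ++ [x]) ++ pad) (fun y => y) true).Perm
      (insD x (PySem.List.sorted (l ++ pad) (fun y => y) true)) := by
    have p1 : ((l ++ [x]) ++ pad).Perm (x :: (l ++ pad)) := by
      rw [List.append_assoc]
      exact List.perm_middle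
    have p2 : (x :: (l ++ pad)).Perm (x :: PySem.List.sorted (l ++ pad) (fun y => y) true) :=
      (PySem.List.sorted_perm _ _ _).symm.cons x
    exact ((PySem.List.sorted_perm _ _ _).trans (p1.trans p2)).trans (insD_perm x _).symm
  have h1 : (PySem.List.sorted ((l ++ [x]) ++ pad) (fun y => y) true).Pairwise
      (fun a b => (fun y : Int => -y) a ≤ (fun y : Int => -y) b) := by
    have := PySem.List.sorted_pairwise_rev ((l ++ [x]) ++ pad) (fun y : Int => y)
    exact this.imp (by intro a b h; simpa using h)
  have h2 : (insD x (PySem.List.sorted (l ++ pad) (fun y => y) true)).Pairwise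
      (fun a b => (fun y : Int => -y) a ≤ (fun y : Int => -y) b) := by
    have hp := PySem.List.sorted_pairwise_rev (l ++ pad) (fun y : Int => y)
    have := insD_pairwise (x := x) (l := PySem.List.sorted (l ++ pad) (fun y => y) true)
      (hp.imp (by intro a b h; simpa using h))
    exact this.imp (by intro a b h; simpa using h)
  exact PySem.List.eq_of_perm_of_pairwise_le_of_injective (fun y : Int => -y)
    (fun a b h => by simpa using congrArg Neg.neg h) hperm h1 h2

-- the loop invariant: A's fold state is the first three of B's padded descending sort
lemma fold_eq_take3 (l : List Int) :
    (match PySem.List.sorted (l ++ [0, 0, 0]) (fun x => x) true with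
      | a :: b :: c :: _ => (a, b, c)
      | _ => ((0 : Int), (0 : Int), (0 : Int)))
      = l.foldl stepA (0, 0, 0) := by
  induction l using List.reverseRecOn with
  | nil => rfl
  | append_singleton l x ih =>
    have hlen : 3 ≤ (PySem.List.sorted (l ++ [0, 0, 0]) (fun x => x) true).length := by
      rw [PySem.List.length_sorted]; simp
    obtain ⟨a, b, c, rest, hs⟩ :
        ∃ a b c rest, PySem.List.sorted (l ++ [0, 0, 0]) (fun x => x) true = a :: b :: c :: rest := by
      rcases h : PySem.List.sorted (l ++ [0, 0, 0]) (fun x => x) true with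
        _ | ⟨a, _ | ⟨b, _ | ⟨c, rest⟩⟩⟩ <;> simp [h] at hlen ⊢
    rw [List.foldl_append, sorted_append_singleton l x [0, 0, 0], hs]
    rw [hs] at ih
    simp only [List.foldl_cons, List.foldl_nil, ← ih]
    simp only [insD, stepA]
    split_ifs <;> rfl

-- ===== VERDICT (by name: the statement is the Claim_ definition above) =====
theorem searchThreeMaxNumbers_spec : Claim_equal_searchThreeMaxNumbers := by
  intro l _
  unfold Spec_searchThreeMaxNumbers searchThreeMaxNumbers searchThreeMaxNumbers_alt
  have h := fold_eq_take3 l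
  rcases hs : PySem.List.sorted (l ++ [0, 0, 0]) (fun x => x) true with
    _ | ⟨a, _ | ⟨b, _ | ⟨c, rest⟩⟩⟩
  all_goals rw [hs] at h
  · have : 3 ≤ (PySem.List.sorted (l ++ [0, 0, 0]) (fun x => x) true).length := by
      rw [PySem.List.length_sorted]; simp
    rw [hs] at this; simp at this
  · have : 3 ≤ (PySem.List.sorted (l ++ [0, 0, 0]) (fun x => x) true).length := by
      rw [PySem.List.length_sorted]; simp
    rw [hs] at this; simp at this
  · have : 3 ≤ (PySem.List.sorted (l ++ [0, 0, 0]) (fun x => x) true).length := by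
      rw [PySem.List.length_sorted]; simp
    rw [hs] at this; simp at this
  · rw [← h]
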